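-- pv_equiv track=rewrite | github.com/iam-kathir/healthcare-compliance-agent | DATATHON2.O/agents/thinker.py | _match_policy
-- ===== SOURCE A (Python) =====
-- def _match_policy(claim_data: dict, policies: list) -> dict:
--     """Find the best matching policy for a claim's CPT code."""
--     cpt = claim_data.get("cpt_code", "")
--     best_match = None
--     best_score = 0
--
--     for policy in policies:
--         codes = policy.get("affected_codes", "")
--         if cpt and cpt in codes:
--             impact_score = {"HIGH": 3, "MEDIUM": 2, "LOW": 1}.get(policy.get("impact_level", "LOW"), 1)
--             if impact_score > best_score:
--                 best_score = impact_score
--                 best_match = policy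
--
--     return best_match or {}
-- ===== SOURCE B (Python) =====
-- def _match_policy(claim_data: dict, policies: list) -> dict:
--     """Find the best matching policy for a claim's CPT code (filter, then max-score pick)."""
--     cpt = claim_data.get("cpt_code", "")
--     matches = [p for p in policies if cpt and cpt in p.get("affected_codes", "")]
--     if not matches:
--         return {}
--
--     def score(p):
--         return {"HIGH": 3, "MEDIUM": 2, "LOW": 1}.get(p.get("impact_level", "LOW"), 1)
--
--     best = max(score(p) for p in matches)
--     return next(p for p in matches if score(p) == best)
-- ===== Notes on version B (the rewrite author's own statement) =====
-- stated objective: alternative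
-- what changed: A's single running-best scan with mutable best_match/best_score is replaced by a filter-then-select decomposition: build the list of matching policies, compute the maximum impact score, and return the first match attaining it ({} when nothing matches).
import Mathlib
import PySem

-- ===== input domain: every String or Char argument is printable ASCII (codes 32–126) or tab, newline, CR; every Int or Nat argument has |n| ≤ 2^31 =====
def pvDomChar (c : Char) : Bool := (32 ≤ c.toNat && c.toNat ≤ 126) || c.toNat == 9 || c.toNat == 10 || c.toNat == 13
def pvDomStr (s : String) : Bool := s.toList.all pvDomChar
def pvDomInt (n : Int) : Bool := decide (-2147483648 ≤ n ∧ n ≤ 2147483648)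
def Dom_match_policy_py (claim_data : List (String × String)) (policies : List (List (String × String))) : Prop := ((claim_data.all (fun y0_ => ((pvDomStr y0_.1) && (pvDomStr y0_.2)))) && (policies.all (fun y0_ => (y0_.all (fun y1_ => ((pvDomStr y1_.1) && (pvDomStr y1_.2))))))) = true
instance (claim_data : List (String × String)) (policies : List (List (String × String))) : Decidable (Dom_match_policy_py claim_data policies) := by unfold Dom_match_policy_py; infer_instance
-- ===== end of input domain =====

-- B replaces A's running-best scan by a filter / max-score / first-attaining-match decomposition (objective: alternative, same cost).

-- shared helpers: both Pythons use dict.get with a string default and the same literal impact-score dict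
-- dict.get(k, dflt) on an association list: first matching key, else the default
def pvGetD (d : List (String × String)) (k dflt : String) : String :=
  match d.find? (fun kv => kv.1 == k) with
  | some kv => kv.2
  | none => dflt

-- {"HIGH": 3, "MEDIUM": 2, "LOW": 1}.get(lvl, 1)
def pvScore (lvl : String) : Int :=
  PySem.Dict.getD (PySem.Dict.ofList [("HIGH", (3 : Int)), ("MEDIUM", (2 : Int)), ("LOW", (1 : Int))]) lvl 1

-- "cpt and cpt in policy.get('affected_codes', '')" as a Bool
def pvCond (cpt : String) (p : List (String × String)) : Bool :=
  decide (cpt ≠ "") && PySem.Str.isIn cpt (pvGetD p "affected_codes" "")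

-- impact score of a policy
def pvSc (p : List (String × String)) : Int := pvScore (pvGetD p "impact_level" "LOW")

-- ===== PORT A =====
def match_policy_py (claim_data : List (String × String)) (policies : List (List (String × String))) : List (String × String) :=
  let cpt := pvGetD claim_data "cpt_code" ""
  let r := policies.foldl
    (fun (st : Option (List (String × String)) × Int) policy =>
      if pvCond cpt policy then
        (if st.2 < pvSc policy then (some policy, pvSc policy) else st)
      else st)
    (none, 0)
  match r.1 with
  | none => []
  | some b => if b = [] then [] else b   -- "best_match or {}": an empty dict is falsy

-- ===== PORT B =====
def match_policy_py_alt (claim_data : List (String × String)) (policies : List (List (String × String))) : List (String × String) :=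
  let cpt := pvGetD claim_data "cpt_code" ""
  let matchesL := policies.filter (fun p => pvCond cpt p)
  match matchesL with
  | [] => []
  | _ :: _ =>
    let best := (PySem.List.max? (matchesL.map (fun p => pvSc p)) (fun x => x)).getD 0   -- max(...) on a nonempty list; getD totalizes
    (matchesL.find? (fun p => pvSc p == best)).getD []   -- next(...): always found; getD totalizes

-- ===== PRECONDITION & SPEC =====
def Spec_match_policy_py (claim_data : List (String × String)) (policies : List (List (String × String))) (out : List (String × String)) : Prop := out = match_policy_py_alt claim_data policies
instance (claim_data : List (String × String)) (policies : List (List (String × String))) (out : List (String × String)) : Decidable (Spec_match_policy_py claim_data policies out) := by unfold Spec_match_policy_py; infer_instance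

-- ===== CLAIM (what is proved, stated in full; the proofs are below) =====
def Claim_equal_match_policy_py : Prop := ∀ (claim_data : List (String × String)) (policies : List (List (String × String))), Dom_match_policy_py claim_data policies → Spec_match_policy_py claim_data policies (match_policy_py claim_data policies)

-- ===== LEMMAS AND PROOFS =====

-- the loop body of A applied only to matching policies
def pvStep (st : Option (List (String × String)) × Int) (p : List (String × String)) :
    Option (List (String × String)) × Int :=
  if st.2 < pvSc p then (some p, pvSc p) else st

-- maximum impact score of a list of policies (0 for [])
def pvMax : List (List (String × String)) → Int
  | [] => 0
  | p :: t => max (pvSc p) (pvMax t)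

theorem pvScore_pos (lvl : String) : 1 ≤ pvScore lvl := by
  unfold pvScore
  have h : PySem.Dict.ofList [("HIGH", (3 : Int)), ("MEDIUM", (2 : Int)), ("LOW", (1 : Int))]
      = PySem.Dict.mk [("HIGH", (3 : Int)), ("MEDIUM", (2 : Int)), ("LOW", (1 : Int))] := by decide
  rw [h]
  simp [PySem.Dict.getD_eq_get?_getD, PySem.Dict.get?_mk_cons]
  split_ifs <;> simp [PySem.Dict.get?]

theorem pvSc_pos (p : List (String × String)) : 1 ≤ pvSc p :=
  pvScore_pos _

theorem foldl_filter (cpt : String) (ps : List (List (String × String)))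
    (st : Option (List (String × String)) × Int) :
    ps.foldl (fun st policy =>
        if pvCond cpt policy then
          (if st.2 < pvSc policy then (some policy, pvSc policy) else st)
        else st) st
      = (ps.filter (fun p => pvCond cpt p)).foldl pvStep st := by
  induction ps generalizing st with
  | nil => rfl
  | cons p t ih =>
    simp only [List.foldl_cons, List.filter_cons]
    by_cases h : pvCond cpt p
    · simp [h, ih, pvStep]
    · simp [h, ih]

theorem fold_argmax (ms : List (List (String × String)))
    (ob : Option (List (String × String))) (sb : Int) (h : 0 ≤ sb) :
    ms.foldl pvStep (ob, sb)
      = if sb < pvMax ms then (ms.find? (fun p => pvSc p == pvMax ms), pvMax ms) else (ob, sb) := by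
  induction ms generalizing ob sb with
  | nil => simp [pvMax]; omega
  | cons p t ih =>
    simp only [List.foldl_cons, pvMax]
    by_cases h1 : sb < pvSc p
    · rw [show pvStep (ob, sb) p = (some p, pvSc p) from by simp [pvStep, h1]]
      rw [ih (some p) (pvSc p) (by omega)]
      rcases lt_or_ge (pvSc p) (pvMax t) with h2 | h2
      · rw [max_eq_right (le_of_lt h2)]
        rw [if_pos h2, if_pos (by omega : sb < pvMax t)]
        rw [List.find?_cons_of_neg (by simp only [beq_iff_eq]; omega)]
      · rw [max_eq_left h2]
        rw [if_neg (by omega), if_pos h1]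
        rw [List.find?_cons_of_pos (by simp)]
    · rw [show pvStep (ob, sb) p = (ob, sb) from by simp [pvStep, h1]]
      rw [ih ob sb h]
      by_cases h2 : sb < pvMax t
      · have h3 : max (pvSc p) (pvMax t) = pvMax t := max_eq_right (by omega)
        rw [h3, if_pos h2, if_pos h2]
        rw [List.find?_cons_of_neg (by simp only [beq_iff_eq]; omega)]
      · have h3 : ¬ sb < max (pvSc p) (pvMax t) := by
          rcases max_cases (pvSc p) (pvMax t) with ⟨he, _⟩ | ⟨he, _⟩ <;> rw [he] <;> omega
        rw [if_neg h2, if_neg h3]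

theorem foldl_max_eq (t : List (List (String × String))) (a : Int) (h : 0 ≤ a) :
    (t.map (fun p => pvSc p)).foldl max a = max a (pvMax t) := by
  induction t generalizing a with
  | nil => simp [pvMax]; omega
  | cons p t ih =>
    simp only [List.map_cons, List.foldl_cons, pvMax]
    rw [ih (max a (pvSc p)) (le_max_of_le_left h)]
    rw [max_assoc]

theorem pvMax_attained (ms : List (List (String × String))) (h : ms ≠ []) :
    ∃ p ∈ ms, pvSc p = pvMax ms := by
  induction ms with
  | nil => simp at h
  | cons p t ih =>
    rcases eq_or_ne t [] with rfl | ht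
    · exact ⟨p, by simp, by have := pvSc_pos p; simp [pvMax]; omega⟩
    · rcases ih ht with ⟨q, hq, hqs⟩
      rcases le_total (pvSc p) (pvMax t) with h1 | h1
      · exact ⟨q, by simp [hq], by simp [pvMax, hqs, max_eq_right h1]⟩
      · exact ⟨p, by simp, by simp [pvMax, max_eq_left h1]⟩

theorem cond_ne_nil (cpt : String) (h : pvCond cpt [] = true) : False := by
  simp only [pvCond, pvGetD, List.find?_nil, Bool.and_eq_true, decide_eq_true_eq] at h
  obtain ⟨h1, h2⟩ := h
  rw [PySem.Str.isIn_iff_infix] at h2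
  simp at h2
  exact h1 h2

-- ===== VERDICT (by name: the statement is the Claim_ definition above) =====
theorem match_policy_py_spec : Claim_equal_match_policy_py := by
  intro cd ps _
  unfold Spec_match_policy_py
  simp only [match_policy_py, match_policy_py_alt]
  rw [foldl_filter]
  generalize (pvGetD cd "cpt_code" "") = cpt
  generalize hms : ps.filter (fun p => pvCond cpt p) = ms
  rw [fold_argmax ms none 0 le_rfl]
  cases ms with
  | nil =>
    rw [if_neg (by simp [pvMax])]
  | cons m t =>
    have hpos : (0 : Int) < pvMax (m :: t) := by
      have h1 := pvSc_pos m
      have h2 : pvSc m ≤ pvMax (m :: t) := le_max_left _ _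
      omega
    rw [if_pos hpos]
    obtain ⟨q, hq, hqs⟩ := pvMax_attained (m :: t) (by simp)
    have hsome : (List.find? (fun p => pvSc p == pvMax (m :: t)) (m :: t)).isSome := by
      exact List.find?_isSome.mpr ⟨q, hq, by simp [hqs]⟩
    obtain ⟨b, hb⟩ := Option.isSome_iff_exists.mp hsome
    have hbmem := List.mem_of_find?_eq_some hb
    have hbcond : pvCond cpt b = true := List.of_mem_filter (hms ▸ hbmem)
    have hbne : b ≠ [] := by
      intro he
      exact cond_ne_nil cpt (he ▸ hbcond)
    have hbest : (PySem.List.max? ((m :: t).map (fun p => pvSc p)) (fun x => x)).getD 0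
        = pvMax (m :: t) := by
      rw [List.map_cons, PySem.List.max?_id_cons]
      rw [foldl_max_eq t (pvSc m) (by have := pvSc_pos m; omega)]
      simp [pvMax]
    rw [hbest, hb]
    simp [hbne]
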